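-- pv_equiv track=rewrite | github.com/bodunov78/demo_repo | 01062024_exam/demo/18042024_kurs/64908.py | fufu
-- ===== SOURCE A (Python) =====
-- def fufu(s,e,a):
--     if s>e+12 : return 0
--     elif s==e : return 1
--
--     else:
--         if a==0:
--             return fufu(s-1,e,1)+fufu(s+3,e,0)+fufu(s*2,e,0)
--         else:
--             return  fufu(s + 3, e,0) + fufu(s * 2, e,0)
-- ===== SOURCE B (Python) =====
-- def fufu(s, e, a):
--     # Memoized re-implementation: each distinct (s, a) state is evaluated once
--     memo = {}
--
--     def go(s, a):
--         if s > e + 12: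
--             return 0
--         if s == e:
--             return 1
--         v = memo.get((s, a))
--         if v is None:
--             if a == 0:
--                 v = go(s - 1, 1) + go(s + 3, 0) + go(s * 2, 0)
--             else:
--                 v = go(s + 3, 0) + go(s * 2, 0)
--             memo[(s, a)] = v
--         return v
--
--     return go(s, a)
-- ===== Notes on version B (the rewrite author's own statement) =====
-- stated objective: alternative
-- what changed: B memoizes the recursion on the (s,a) state (fixed e) in a dictionary, so each distinct state is evaluated once instead of once per call path as in A's plain tree recursion.
-- outside the precondition, e.g. on fufu(2, 1, 0): A returns 1, B returns 1; on fufu(1, 0, 0): A raises RecursionError, B raises RecursionError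
import Mathlib
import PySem

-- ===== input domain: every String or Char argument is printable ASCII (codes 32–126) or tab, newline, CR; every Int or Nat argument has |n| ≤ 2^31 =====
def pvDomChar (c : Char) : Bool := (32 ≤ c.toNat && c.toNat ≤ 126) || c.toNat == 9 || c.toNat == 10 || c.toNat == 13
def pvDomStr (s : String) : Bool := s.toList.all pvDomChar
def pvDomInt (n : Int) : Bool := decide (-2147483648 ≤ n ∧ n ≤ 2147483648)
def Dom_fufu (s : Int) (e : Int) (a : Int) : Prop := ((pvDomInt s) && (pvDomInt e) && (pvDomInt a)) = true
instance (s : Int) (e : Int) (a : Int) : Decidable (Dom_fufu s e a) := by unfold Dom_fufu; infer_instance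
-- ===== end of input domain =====

-- B replaces A's plain tree recursion by memoization on the (s,a) state (fixed e):
-- each distinct state is computed once (objective: alternative).
-- Both ports carry a fuel parameter only to be total in Lean; inside Pre_fufu the fuel never runs out.

-- ===== PORT A =====
def fufuFuel : Nat → Int → Int → Int → Int
  | 0, _, _, _ => 0
  | n + 1, s, e, a =>
    if s > e + 12 then 0
    else if s = e then 1
    else if a = 0 then
      fufuFuel n (s - 1) e 1 + fufuFuel n (s + 3) e 0 + fufuFuel n (s * 2) e 0
    else
      fufuFuel n (s + 3) e 0 + fufuFuel n (s * 2) e 0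

def fufu (s : Int) (e : Int) (a : Int) : Int :=
  fufuFuel ((3 * (e + 12 - s) + 5).toNat + 1) s e a

-- ===== PORT B =====
-- go from Source B: threads the memo dictionary through the recursion and returns (memo, value).
def fufuGo : Nat → Int → Int → Int → PySem.Dict (Int × Int) Int → PySem.Dict (Int × Int) Int × Int
  | 0, _, _, _, memo => (memo, 0)
  | n + 1, e, s, a, memo =>
    if s > e + 12 then (memo, 0)
    else if s = e then (memo, 1)
    else
      match memo.get? (s, a) with
      | some v => (memo, v)
      | none =>
        if a = 0 then
          let r1 := fufuGo n e (s - 1) 1 memo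
          let r2 := fufuGo n e (s + 3) 0 r1.1
          let r3 := fufuGo n e (s * 2) 0 r2.1
          let v := r1.2 + r2.2 + r3.2
          (r3.1.insert (s, a) v, v)
        else
          let r2 := fufuGo n e (s + 3) 0 memo
          let r3 := fufuGo n e (s * 2) 0 r2.1
          let v := r2.2 + r3.2
          (r3.1.insert (s, a) v, v)

def fufu_alt (s : Int) (e : Int) (a : Int) : Int :=
  (fufuGo ((3 * (e + 12 - s) + 5).toNat + 1) e s a PySem.Dict.empty).2

-- ===== PRECONDITION & SPEC =====
-- Pre_fufu excludes only the low-start recursive region s ≤ 2 (with s ≤ e + 12, s ≠ e), where the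
-- state graph cycles ((2,0) ↔ (1,1), (0,0) → (0,0)) and A raises RecursionError for almost every e;
-- the few terminating low-start cases A has (e.g. (2,1,0), where a base case cuts the cycle) are
-- excluded with that region, and B agrees with A there anyway (same value, or same divergence).
def Pre_fufu (s : Int) (e : Int) (a : Int) : Prop :=
  s > e + 12 ∨ s = e ∨ 3 ≤ s
instance (s : Int) (e : Int) (a : Int) : Decidable (Pre_fufu s e a) := by
  unfold Pre_fufu; infer_instance

def pvWitness_fufu : Int × Int × Int := (3, 20, 0)

def Spec_fufu (s : Int) (e : Int) (a : Int) (out : Int) : Prop := out = fufu_alt s e a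
instance (s : Int) (e : Int) (a : Int) (out : Int) : Decidable (Spec_fufu s e a out) := by
  unfold Spec_fufu; infer_instance

-- ===== CLAIM (what is proved, stated in full; the proofs are below) =====
def Claim_equal_fufu : Prop :=
  ∀ (s : Int) (e : Int) (a : Int), Dom_fufu s e a → Pre_fufu s e a → Spec_fufu s e a (fufu s e a)

-- ===== LEMMAS AND PROOFS =====

-- Invariant on the (s, a) states reachable inside Pre_fufu, and the termination measure.
def fInv (s a : Int) : Prop := (a = 0 → 3 ≤ s) ∧ (a ≠ 0 → 2 ≤ s)

def fphi (e s a : Int) : Int := 3 * (e + 12 - s) + (if a = 0 then 4 else 0)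

-- A's canonical value: fufuFuel with provably sufficient fuel.
def fAV (e s a : Int) : Int := fufuFuel ((fphi e s a).toNat + 2) s e a

lemma fufuFuel_gt (n : Nat) (s e a : Int) (h : s > e + 12) : fufuFuel n s e a = 0 := by
  cases n with
  | zero => rfl
  | succ k => simp [fufuFuel, h]

lemma fphi_eq (e s a : Int) (ha : a ≠ 0) : fphi e s a = 3 * (e + 12 - s) := by
  simp [fphi, ha]

lemma fphi_eq0 (e s : Int) : fphi e s 0 = 3 * (e + 12 - s) + 4 := by
  simp [fphi]

lemma fInv_children (s a : Int) (h : fInv s a) :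
    (a = 0 → fInv (s - 1) 1) ∧ fInv (s + 3) 0 ∧ fInv (s * 2) 0 := by
  obtain ⟨h0, h1⟩ := h
  have hs2 : 2 ≤ s := by
    rcases eq_or_ne a 0 with ha | ha
    · have := h0 ha; omega
    · exact h1 ha
  refine ⟨fun ha => ?_, ⟨fun _ => by omega, fun _ => by omega⟩,
    ⟨fun _ => by omega, fun _ => by omega⟩⟩
  have h3 := h0 ha
  exact ⟨fun hc => by norm_num at hc, fun _ => by omega⟩

lemma fphi_children (e s a : Int) (h : fInv s a) (h1 : ¬ s > e + 12) (_h2 : s ≠ e) :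
    (a = 0 → fphi e (s - 1) 1 < fphi e s a) ∧ fphi e (s + 3) 0 < fphi e s a ∧
    fphi e (s * 2) 0 < fphi e s a ∧ 0 ≤ fphi e s a := by
  obtain ⟨i0, i1⟩ := h
  rcases eq_or_ne a 0 with ha | ha
  · have h3 := i0 ha
    subst ha
    rw [fphi_eq0, fphi_eq0, fphi_eq0, fphi_eq e (s - 1) 1 (by norm_num)]
    refine ⟨fun _ => by omega, by omega, by omega, by omega⟩
  · have h2s := i1 ha
    rw [fphi_eq e s a ha, fphi_eq0, fphi_eq0, fphi_eq e (s - 1) 1 (by norm_num)]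
    exact ⟨fun hc => absurd hc ha, by omega, by omega, by omega⟩

lemma fphi_nonneg (e s a : Int) (h : fInv s a) (h1 : ¬ s > e + 12) : 0 ≤ fphi e s a := by
  obtain ⟨i0, i1⟩ := h
  rcases eq_or_ne a 0 with ha | ha
  · have := i0 ha; subst ha; rw [fphi_eq0]; omega
  · have := i1 ha; rw [fphi_eq e s a ha]; omega

-- fufuFuel does not depend on the fuel once the fuel exceeds the measure.
lemma fufuFuel_stable (e : Int) :
    ∀ n m : Nat, ∀ s a : Int, fInv s a → fphi e s a + 1 < n → fphi e s a + 1 < m →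
      fufuFuel n s e a = fufuFuel m s e a := by
  intro n
  induction n using Nat.strong_induction_on with
  | _ n ih =>
    intro m s a hInv hn hm
    by_cases h1 : s > e + 12
    · rw [fufuFuel_gt n s e a h1, fufuFuel_gt m s e a h1]
    · have hpos := fphi_nonneg e s a hInv h1
      obtain ⟨n', rfl⟩ : ∃ n', n = n' + 1 := ⟨n - 1, by omega⟩
      obtain ⟨m', rfl⟩ : ∃ m', m = m' + 1 := ⟨m - 1, by omega⟩
      by_cases h2 : s = e
      · simp [fufuFuel, h2]
      · obtain ⟨hc1, hc2, hc3⟩ := fInv_children s a hInv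
        obtain ⟨hp1, hp2, hp3, _⟩ := fphi_children e s a hInv h1 h2
        have e2 := ih n' (by omega) m' (s + 3) 0 hc2 (by omega) (by omega)
        have e3 := ih n' (by omega) m' (s * 2) 0 hc3 (by omega) (by omega)
        by_cases ha : a = 0
        · have hp1' := hp1 ha
          have e1 := ih n' (by omega) m' (s - 1) 1 (hc1 ha) (by omega) (by omega)
          simp [fufuFuel, h1, h2, ha, e1, e2, e3]
        · simp [fufuFuel, h1, h2, ha, e2, e3]

lemma fAV_gt (e s a : Int) (h : s > e + 12) : fAV e s a = 0 :=
  fufuFuel_gt _ s e a h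

lemma fAV_self (e a : Int) : fAV e e a = 1 := by
  unfold fAV
  simp [fufuFuel, show ¬ (e > e + 12) by omega]

lemma fAV_eq_fufuFuel (e s a : Int) (n : Nat) (hInv : fInv s a) (hn : fphi e s a + 1 < n) :
    fufuFuel n s e a = fAV e s a :=
  fufuFuel_stable e n ((fphi e s a).toNat + 2) s a hInv hn (by omega)

lemma fAV_rec (e s a : Int) (hInv : fInv s a) (h1 : ¬ s > e + 12) (h2 : s ≠ e) :
    fAV e s a = if a = 0 then fAV e (s - 1) 1 + fAV e (s + 3) 0 + fAV e (s * 2) 0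
      else fAV e (s + 3) 0 + fAV e (s * 2) 0 := by
  obtain ⟨hc1, hc2, hc3⟩ := fInv_children s a hInv
  obtain ⟨hp1, hp2, hp3, hp0⟩ := fphi_children e s a hInv h1 h2
  have e2 := fAV_eq_fufuFuel e (s + 3) 0 ((fphi e s a).toNat + 1) hc2 (by omega)
  have e3 := fAV_eq_fufuFuel e (s * 2) 0 ((fphi e s a).toNat + 1) hc3 (by omega)
  by_cases ha : a = 0
  · have hp1' := hp1 ha
    have e1 := fAV_eq_fufuFuel e (s - 1) 1 ((fphi e s a).toNat + 1) (hc1 ha) (by omega)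
    generalize hK : (fphi e s a).toNat + 1 = K at e1 e2 e3
    have hAV : fAV e s a = fufuFuel (K + 1) s e a := by rw [← hK]; rfl
    rw [hAV]
    simp [fufuFuel, h1, h2, ha, e1, e2, e3]
  · generalize hK : (fphi e s a).toNat + 1 = K at e2 e3
    have hAV : fAV e s a = fufuFuel (K + 1) s e a := by rw [← hK]; rfl
    rw [hAV]
    simp [fufuFuel, h1, h2, ha, e2, e3]

-- The memo invariant: every stored entry is the canonical A-value of an invariant state.
def fMemInv (e : Int) (memo : PySem.Dict (Int × Int) Int) : Prop :=
  ∀ (p : Int × Int) (v : Int), memo.get? p = some v → fInv p.1 p.2 ∧ v = fAV e p.1 p.2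

lemma fMemInv_empty (e : Int) : fMemInv e PySem.Dict.empty := by
  intro p v h
  simp [PySem.Dict.get?_empty] at h

lemma fufuGo_spec (e : Int) :
    ∀ n : Nat, ∀ s a : Int, ∀ memo : PySem.Dict (Int × Int) Int,
      fInv s a → fMemInv e memo → fphi e s a + 1 < n →
      (fufuGo n e s a memo).2 = fAV e s a ∧ fMemInv e (fufuGo n e s a memo).1 := by
  intro n
  induction n using Nat.strong_induction_on with
  | _ n ih =>
    intro s a memo hInv hMem hn
    by_cases h1 : s > e + 12
    · cases n with
      | zero => exact ⟨by simp [fufuGo, fAV_gt e s a h1], hMem⟩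
      | succ n' => exact ⟨by simp [fufuGo, h1, fAV_gt e s a h1], by simp [fufuGo, h1, hMem]⟩
    · have hpos := fphi_nonneg e s a hInv h1
      obtain ⟨n', rfl⟩ : ∃ n', n = n' + 1 := ⟨n - 1, by omega⟩
      by_cases h2 : s = e
      · subst h2
        exact ⟨by simp [fufuGo, h1, fAV_self], by simp [fufuGo, h1, hMem]⟩
      · obtain ⟨hc1, hc2, hc3⟩ := fInv_children s a hInv
        obtain ⟨hp1, hp2, hp3, _⟩ := fphi_children e s a hInv h1 h2
        rcases hg : memo.get? (s, a) with _ | v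
        · by_cases ha : a = 0
          · subst ha
            have hp1' := hp1 rfl
            obtain ⟨v1, m1⟩ := ih n' (by omega) (s - 1) 1 memo (hc1 rfl) hMem (by omega)
            obtain ⟨v2, m2⟩ := ih n' (by omega) (s + 3) 0 _ hc2 m1 (by omega)
            obtain ⟨v3, m3⟩ := ih n' (by omega) (s * 2) 0 _ hc3 m2 (by omega)
            have hstep : fufuGo (n' + 1) e s 0 memo =
                ((fufuGo n' e (s * 2) 0 (fufuGo n' e (s + 3) 0 (fufuGo n' e (s - 1) 1 memo).1).1).1.insert
                    (s, 0)
                    ((fufuGo n' e (s - 1) 1 memo).2 +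
                      (fufuGo n' e (s + 3) 0 (fufuGo n' e (s - 1) 1 memo).1).2 +
                      (fufuGo n' e (s * 2) 0 (fufuGo n' e (s + 3) 0 (fufuGo n' e (s - 1) 1 memo).1).1).2),
                  (fufuGo n' e (s - 1) 1 memo).2 +
                    (fufuGo n' e (s + 3) 0 (fufuGo n' e (s - 1) 1 memo).1).2 +
                    (fufuGo n' e (s * 2) 0 (fufuGo n' e (s + 3) 0 (fufuGo n' e (s - 1) 1 memo).1).1).2) := by
              simp [fufuGo, h1, h2, hg]
            have hsum : (fufuGo n' e (s - 1) 1 memo).2 +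
                (fufuGo n' e (s + 3) 0 (fufuGo n' e (s - 1) 1 memo).1).2 +
                (fufuGo n' e (s * 2) 0 (fufuGo n' e (s + 3) 0 (fufuGo n' e (s - 1) 1 memo).1).1).2
                = fAV e s 0 := by
              rw [v1, v2, v3, fAV_rec e s 0 hInv h1 h2, if_pos rfl]
            rw [hstep]
            refine ⟨hsum, fun p v hpv => ?_⟩
            by_cases hp : p = (s, 0)
            · subst hp
              rw [PySem.Dict.get?_insert_self] at hpv
              exact ⟨hInv, by rw [← Option.some.inj hpv, hsum]⟩
            · rw [PySem.Dict.get?_insert_of_ne _ _ hp] at hpv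
              exact m3 p v hpv
          · obtain ⟨v2, m2⟩ := ih n' (by omega) (s + 3) 0 memo hc2 hMem (by omega)
            obtain ⟨v3, m3⟩ := ih n' (by omega) (s * 2) 0 _ hc3 m2 (by omega)
            have hstep : fufuGo (n' + 1) e s a memo =
                ((fufuGo n' e (s * 2) 0 (fufuGo n' e (s + 3) 0 memo).1).1.insert (s, a)
                    ((fufuGo n' e (s + 3) 0 memo).2 +
                      (fufuGo n' e (s * 2) 0 (fufuGo n' e (s + 3) 0 memo).1).2),
                  (fufuGo n' e (s + 3) 0 memo).2 +
                    (fufuGo n' e (s * 2) 0 (fufuGo n' e (s + 3) 0 memo).1).2) := by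
              simp [fufuGo, h1, h2, hg, ha]
            have hsum : (fufuGo n' e (s + 3) 0 memo).2 +
                (fufuGo n' e (s * 2) 0 (fufuGo n' e (s + 3) 0 memo).1).2 = fAV e s a := by
              rw [v2, v3, fAV_rec e s a hInv h1 h2, if_neg ha]
            rw [hstep]
            refine ⟨hsum, fun p v hpv => ?_⟩
            by_cases hp : p = (s, a)
            · subst hp
              rw [PySem.Dict.get?_insert_self] at hpv
              exact ⟨hInv, by rw [← Option.some.inj hpv, hsum]⟩
            · rw [PySem.Dict.get?_insert_of_ne _ _ hp] at hpv
              exact m3 p v hpv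
        · refine ⟨?_, ?_⟩
          · simp [fufuGo, h1, h2, hg, (hMem (s, a) v hg).2]
          · simp [fufuGo, h1, h2, hg, hMem]

-- ===== VERDICT (by name: the statement is the Claim_ definition above) =====
theorem fufu_spec : Claim_equal_fufu := by
  intro s e a _ hPre
  show fufu s e a = fufu_alt s e a
  by_cases hgt : s > e + 12
  · rw [fufu, fufuFuel_gt _ s e a hgt]
    simp [fufu_alt, fufuGo, hgt]
  · rcases hPre with h | h | h3
    · exact absurd h hgt
    · subst h
      simp [fufu, fufu_alt, fufuFuel, fufuGo, hgt]
    · have hInv : fInv s a := ⟨fun _ => h3, fun _ => by omega⟩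
      have hfuel : fphi e s a + 1 < ((3 * (e + 12 - s) + 5).toNat + 1 : Nat) := by
        have := fphi_nonneg e s a hInv hgt
        rcases eq_or_ne a 0 with ha | ha
        · subst ha; rw [fphi_eq0]; rw [fphi_eq0] at this; omega
        · rw [fphi_eq e s a ha]; rw [fphi_eq e s a ha] at this; omega
      rw [fufu, fAV_eq_fufuFuel e s a _ hInv hfuel]
      exact ((fufuGo_spec e _ s a PySem.Dict.empty hInv (fMemInv_empty e) hfuel).1).symm
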